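-- pv_equiv track=rewrite | github.com/BigOasis/Python | DaheeJeong/Week10/PGS_389479_서버_증설_횟수.py | solution
-- ===== SOURCE A (Python) =====
-- def solution(players, m, k):
--     server = []
--     for player in players:
--         total = sum((server + [1])[-k:]) * m
--
--         if total > player:
--             server.append(0)
--         else:
--             server_num = (player - total) // m + 1
--             server.append(server_num)
--
--     return sum(server)
-- ===== SOURCE B (Python) =====
-- def solution(players, m, k):
--     # O(n) sliding window: keep the running sum of the last k-1 added counts.
--     counts = []
--     wsum = 0  # sum of the most recent k-1 entries of counts
--     for i, player in enumerate(players):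
--         total = (wsum + 1) * m
--         cnt = 0 if total > player else (player - total) // m + 1
--         counts.append(cnt)
--         wsum += cnt
--         if i - (k - 1) >= 0:
--             wsum -= counts[i - (k - 1)]
--     return sum(counts)
-- ===== Notes on version B (the rewrite author's own statement) =====
-- stated objective: faster
-- what changed: B keeps an incremental running sum of the last k-1 added server counts (subtracting the count that falls out of the window each step) instead of A's re-slicing and re-summing the last k entries every iteration; Pre_ excludes non-positive window sizes k, where 'last k entries' is meaningless and B's window indexing raises IndexError while A returns an accidental value of Python's [-k:] slicing, and the m = 0 inputs with a non-negative player, on which both programs raise ZeroDivisionError.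
-- outside the precondition, e.g. on solution([5], 1, 0): A returns 5, B raises IndexError; on solution([5], 1, -2): A returns 6, B raises IndexError
import Mathlib
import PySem

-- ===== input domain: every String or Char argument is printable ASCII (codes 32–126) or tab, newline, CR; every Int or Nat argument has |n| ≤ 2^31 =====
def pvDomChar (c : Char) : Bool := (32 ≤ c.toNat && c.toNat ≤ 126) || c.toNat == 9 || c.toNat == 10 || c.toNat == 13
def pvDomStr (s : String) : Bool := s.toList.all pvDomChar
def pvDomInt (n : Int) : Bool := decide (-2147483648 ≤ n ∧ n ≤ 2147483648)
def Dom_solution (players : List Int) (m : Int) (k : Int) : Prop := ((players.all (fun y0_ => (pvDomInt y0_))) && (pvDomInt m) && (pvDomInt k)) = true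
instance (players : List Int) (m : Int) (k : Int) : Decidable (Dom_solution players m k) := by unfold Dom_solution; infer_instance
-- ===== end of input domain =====

-- B replaces A's per-step slice-and-sum of the last k entries by an incremental
-- running window sum (subtracting the count that leaves the window), so O(n·k) becomes O(n).

-- ===== PORT A =====
-- loop body of A: total = sum((server + [1])[-k:]) * m; append 0 or (player-total)//m + 1
def solutionStepA (m : Int) (k : Int) (server : List Int) (player : Int) : List Int :=
  let total := (PySem.List.slice (server ++ [1]) (some (-k)) none).sum * m
  if total > player then server ++ [0]
  else server ++ [PySem.Int.floordiv (player - total) m + 1]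

def solution (players : List Int) (m : Int) (k : Int) : Int :=
  (players.foldl (solutionStepA m k) []).sum

-- ===== PORT B =====
-- loop body of B: state (counts, wsum); wsum is the sum of the last k-1 entries of counts
def solutionStepB (m : Int) (k : Int) (st : List Int × Int) (ip : Int × Int) : List Int × Int :=
  let total := (st.2 + 1) * m
  let cnt := if total > ip.2 then 0 else PySem.Int.floordiv (ip.2 - total) m + 1
  let counts := st.1 ++ [cnt]
  let wsum := st.2 + cnt
  if ip.1 - (k - 1) ≥ 0 then (counts, wsum - PySem.List.pyGetD counts (ip.1 - (k - 1)) 0)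
  else (counts, wsum)

def solution_alt (players : List Int) (m : Int) (k : Int) : Int :=
  ((PySem.List.enumerate players 0).foldl (solutionStepB m k) ([], 0)).1.sum

-- ===== PRECONDITION & SPEC =====
-- Pre_ excludes non-positive window sizes k (there 'last k entries' is meaningless: B's window
-- indexing raises IndexError while A returns an accidental value of Python's [-k:] slicing),
-- and m = 0 with some non-negative player, where both programs raise ZeroDivisionError.
def Pre_solution (players : List Int) (m : Int) (k : Int) : Prop :=
  1 ≤ k ∧ (m ≠ 0 ∨ ∀ p ∈ players, p < 0)
instance (players : List Int) (m : Int) (k : Int) : Decidable (Pre_solution players m k) := by unfold Pre_solution; infer_instance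
def pvWitness_solution : List Int × Int × Int := ([3, 10, 0, 7], 2, 3)

def Spec_solution (players : List Int) (m : Int) (k : Int) (out : Int) : Prop := out = solution_alt players m k
instance (players : List Int) (m : Int) (k : Int) (out : Int) : Decidable (Spec_solution players m k out) := by unfold Spec_solution; infer_instance

-- ===== CLAIM (what is proved, stated in full; the proofs are below) =====
def Claim_equal_solution : Prop := ∀ (players : List Int) (m : Int) (k : Int), Dom_solution players m k → Pre_solution players m k → Spec_solution players m k (solution players m k)

-- ===== LEMMAS AND PROOFS =====

-- sum of the last K-1 entries of server (B's wsum invariant value)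
def lastWinSum (K : Nat) (server : List Int) : Int :=
  (server.drop (server.length + 1 - K)).sum

-- A's slice-sum equals the running window sum plus 1 (the appended sentinel)
lemma totalA_eq (k : Int) (K : Nat) (hk : k = (K : Int)) (hK : 0 < K) (server : List Int) :
    (PySem.List.slice (server ++ [1]) (some (-k)) none).sum = lastWinSum K server + 1 := by
  subst hk
  rw [PySem.List.slice_from_neg_natCast _ K hK]
  simp only [List.length_append, List.length_cons, List.length_nil]
  rw [List.drop_append_of_le_length (by omega)]
  simp [lastWinSum]

-- B's window update reproduces lastWinSum of the extended list
lemma wsum_step (k : Int) (K : Nat) (hk : k = (K : Int)) (hK : 0 < K)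
    (server : List Int) (cnt : Int) :
    (if ((server.length : Int)) - (k - 1) ≥ 0
      then lastWinSum K server + cnt - PySem.List.pyGetD (server ++ [cnt]) ((server.length : Int) - (k - 1)) 0
      else lastWinSum K server + cnt) = lastWinSum K (server ++ [cnt]) := by
  subst hk
  by_cases h : K ≤ server.length + 1
  · rw [if_pos (by omega)]
    have hj : (server.length : Int) - ((K : Int) - 1) = ((server.length + 1 - K : Nat) : Int) := by
      omega
    have hjlt : server.length + 1 - K < (server ++ [cnt]).length := by simp; omega
    rw [hj, PySem.List.pyGetD_natCast, List.getD_eq_getElem _ _ hjlt]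
    have hsum : ((server ++ [cnt]).drop (server.length + 1 - K)).sum
        = (server ++ [cnt])[server.length + 1 - K] + ((server ++ [cnt]).drop (server.length + 1 - K + 1)).sum := by
      conv_lhs => rw [List.drop_eq_getElem_cons hjlt]
      rw [List.sum_cons]
    have hWs : ((server ++ [cnt]).drop (server.length + 1 - K)).sum = lastWinSum K server + cnt := by
      rw [List.drop_append_of_le_length (by omega)]; simp [lastWinSum]
    have hW' : lastWinSum K (server ++ [cnt]) = ((server ++ [cnt]).drop (server.length + 1 - K + 1)).sum := by
      simp only [lastWinSum]; congr 2; simp; omega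
    rw [hW']
    omega
  · rw [if_neg (by omega)]
    simp only [lastWinSum]
    rw [show server.length + 1 - K = 0 from by omega,
        show (server ++ [cnt]).length + 1 - K = 0 from by simp; omega]
    simp

-- one loop step of B is one loop step of A, through lastWinSum
lemma stepB_eq (m k : Int) (K : Nat) (hk : k = (K : Int)) (hK : 0 < K)
    (server : List Int) (p : Int) :
    solutionStepB m k (server, lastWinSum K server) ((server.length : Int), p)
      = (solutionStepA m k server p, lastWinSum K (solutionStepA m k server p)) := by
  have htot := totalA_eq k K hk hK server
  simp only [solutionStepA, solutionStepB, htot]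
  have hcnt : (if (lastWinSum K server + 1) * m > p then server ++ [0]
      else server ++ [PySem.Int.floordiv (p - (lastWinSum K server + 1) * m) m + 1])
      = server ++ [if (lastWinSum K server + 1) * m > p then 0
          else PySem.Int.floordiv (p - (lastWinSum K server + 1) * m) m + 1] := by
    split <;> rfl
  rw [hcnt]
  have hw := wsum_step k K hk hK server
      (if (lastWinSum K server + 1) * m > p then 0
        else PySem.Int.floordiv (p - (lastWinSum K server + 1) * m) m + 1)
  split_ifs at hw ⊢ with h1 <;> simp_all

lemma length_stepA (m k : Int) (server : List Int) (p : Int) :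
    (solutionStepA m k server p).length = server.length + 1 := by
  simp only [solutionStepA]; split <;> simp

-- the whole fold of B tracks the fold of A together with its window sum
lemma fold_eq (m k : Int) (K : Nat) (hk : k = (K : Int)) (hK : 0 < K) :
    ∀ (ps : List Int) (server : List Int),
      (PySem.List.enumerate ps (server.length : Int)).foldl (solutionStepB m k) (server, lastWinSum K server)
        = (ps.foldl (solutionStepA m k) server, lastWinSum K (ps.foldl (solutionStepA m k) server)) := by
  intro ps
  induction ps with
  | nil => intro server; simp [PySem.List.enumerate_nil]
  | cons p ps ih =>
      intro server
      rw [PySem.List.enumerate_cons, List.foldl_cons, stepB_eq m k K hk hK server p, List.foldl_cons]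
      have h := ih (solutionStepA m k server p)
      rw [length_stepA] at h
      rw [show ((server.length : Int) + 1) = ((server.length + 1 : Nat) : Int) from by omega]
      exact h

-- ===== VERDICT (by name: the statement is the Claim_ definition above) =====
theorem solution_spec : Claim_equal_solution := by
  intro players m k _ hpre
  obtain ⟨hk1, -⟩ := hpre
  unfold Spec_solution solution solution_alt
  have hK : 0 < k.toNat := by omega
  have hk : k = (k.toNat : Int) := (Int.toNat_of_nonneg (by omega)).symm
  have h := fold_eq m k k.toNat hk hK players []
  simp only [List.length_nil, Nat.cast_zero] at h
  rw [show lastWinSum k.toNat ([] : List Int) = 0 from by simp [lastWinSum]] at h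
  rw [h]
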